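-- pv_equiv track=rewrite | github.com/Bdelas777/Python-Practice | buyVolumenes.py | buyVolumes
-- ===== SOURCE A (Python) =====
-- def buyVolumes(volumes):
--     n = len(volumes)
--     result = []
--     available = set()
--     next_to_buy = 1
--
--     for v in volumes:
--         available.add(v)
--         today_purchase = []
--
--         while next_to_buy in available:
--             today_purchase.append(next_to_buy)
--             available.remove(next_to_buy)
--             next_to_buy += 1
--
--         if not today_purchase:
--             result.append([-1])
--         else:
--             result.append(today_purchase)
--
--     return result
-- ===== SOURCE B (Python) =====
-- def buyVolumes(volumes):
--     n = len(volumes)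
--     arrival = {}
--     for i, v in enumerate(volumes):
--         if v not in arrival:
--             arrival[v] = i
--     result = [[] for _ in range(n)]
--     k = 1
--     day = 0
--     while k in arrival:
--         if arrival[k] > day:
--             day = arrival[k]
--         result[day].append(k)
--         k += 1
--     return [lst if lst else [-1] for lst in result]
-- ===== Notes on version B (the rewrite author's own statement) =====
-- stated objective: alternative
-- what changed: A simulates day by day with a mutable available-set and an inner buy-while loop; B instead builds a first-occurrence index once and does a single walk k = 1, 2, ... bucketing each k on the running maximum of its arrival day, then marks still-empty days as no-purchase.
import Mathlib
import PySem

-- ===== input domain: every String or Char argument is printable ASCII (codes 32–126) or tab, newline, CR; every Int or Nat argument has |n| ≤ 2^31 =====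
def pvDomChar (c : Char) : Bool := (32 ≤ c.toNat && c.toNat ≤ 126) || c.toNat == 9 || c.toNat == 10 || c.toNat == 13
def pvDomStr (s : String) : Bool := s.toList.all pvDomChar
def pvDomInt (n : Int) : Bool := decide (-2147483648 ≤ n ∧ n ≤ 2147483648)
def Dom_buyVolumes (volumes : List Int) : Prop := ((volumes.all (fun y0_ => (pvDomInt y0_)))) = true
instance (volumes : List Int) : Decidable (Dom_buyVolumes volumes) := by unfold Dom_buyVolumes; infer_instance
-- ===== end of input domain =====

-- B replaces A's evolving available-set simulation by a first-occurrence index built once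
-- plus a single walk k = 1, 2, … bucketing each k on the running maximum of arrival days
-- (objective: alternative decomposition, same linear cost).

-- ===== PORT A =====

-- termination helper for the inner while loop: removing a present element shrinks the set
theorem pvDiscardLenLt {s : List Int} {x : Int} (h : x ∈ s) :
    (PySem.Set.discard s x).length < s.length := by
  simp only [PySem.Set.discard]
  apply List.length_filter_lt_length_iff_exists.mpr
  exact ⟨x, h, by simp⟩

-- the 'while next_to_buy in available' loop of A
def buyInner (available : PySem.Set Int) (next : Int) (today : List Int) :
    List Int × PySem.Set Int × Int :=
  if h : PySem.Set.contains available next then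
    match hr : PySem.Set.remove? available next with
    | some available' => buyInner available' (next + 1) (today ++ [next])
    | none => (today, available, next)   -- unreachable: membership was checked by the guard
  else (today, available, next)
termination_by available.length
decreasing_by
  simp only [PySem.Set.remove?, h, if_pos] at hr
  cases hr
  exact pvDiscardLenLt ((PySem.Set.contains_iff _ _).mp h)

def buyVolumes (volumes : List Int) : List (List Int) :=
  (volumes.foldl
    (fun (st : List (List Int) × PySem.Set Int × Int) v =>
      let available := PySem.Set.add st.2.1 v
      let r := buyInner available st.2.2 []
      if r.1.isEmpty then (st.1 ++ [[-1]], r.2.1, r.2.2)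
      else (st.1 ++ [r.1], r.2.1, r.2.2))
    (([] : List (List Int)), PySem.Set.empty, (1 : Int))).1

-- ===== PORT B =====

-- first pass of Source B: map each value to the index of its first occurrence
def buildArrival (volumes : List Int) : PySem.Dict Int Int :=
  (PySem.List.enumerate volumes 0).foldl
    (fun d iv => if d.contains iv.2 then d else d.insert iv.2 iv.1)
    PySem.Dict.empty

-- the 'while k in arrival' walk of Source B; fuel only makes the recursion structural:
-- the walk consumes distinct keys of arrival with k strictly increasing, so it runs
-- at most volumes.length iterations and fuel = volumes.length is never exhausted early
def walkB (arrival : PySem.Dict Int Int) (fuel : Nat) (k day : Int)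
    (result : List (List Int)) : List (List Int) :=
  match fuel with
  | 0 => result
  | fuel + 1 =>
    if arrival.contains k then
      let a := arrival.getD k 0       -- arrival[k]; k is present (guarded), so no KeyError
      let day' := if a > day then a else day
      let result' := PySem.List.pySetD result day'
        (PySem.List.pyGetD result day' [] ++ [k])   -- result[day].append(k); day is in range
      walkB arrival fuel (k + 1) day' result'
    else result

def buyVolumes_alt (volumes : List Int) : List (List Int) :=
  let n := volumes.length
  let arrival := buildArrival volumes
  let result := (List.range n).map (fun _ => ([] : List Int))
  let result := walkB arrival n 1 0 result
  result.map (fun lst => if lst.isEmpty then [-1] else lst)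

-- ===== PRECONDITION & SPEC =====
def Spec_buyVolumes (volumes : List Int) (out : List (List Int)) : Prop := out = buyVolumes_alt volumes
instance (volumes : List Int) (out : List (List Int)) : Decidable (Spec_buyVolumes volumes out) := by unfold Spec_buyVolumes; infer_instance

-- ===== CLAIM (what is proved, stated in full; the proofs are below) =====
def Claim_equal_buyVolumes : Prop := ∀ (volumes : List Int), Dom_buyVolumes volumes → Spec_buyVolumes volumes (buyVolumes volumes)

-- ===== LEMMAS AND PROOFS =====

-- 'all of 1..k occur in xs'
def pvPb (xs : List Int) (k : Nat) : Bool :=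
  (List.range k).all (fun j => decide (((j : Int) + 1) ∈ xs))

-- largest k with all of 1..k in xs
def pvChain (xs : List Int) : Nat :=
  Nat.findGreatest (fun k => pvPb xs k = true) xs.length

theorem pvPb_iff {xs : List Int} {k : Nat} :
    pvPb xs k = true ↔ ∀ j : Nat, j < k → ((j : Int) + 1) ∈ xs := by
  simp [pvPb]

theorem pvPb_down {xs : List Int} {j k : Nat} (h : j ≤ k) (hk : pvPb xs k = true) :
    pvPb xs j = true := by
  rw [pvPb_iff] at *
  exact fun t ht => hk t (lt_of_lt_of_le ht h)

theorem pvPb_le_length {xs : List Int} {k : Nat} (h : pvPb xs k = true) : k ≤ xs.length := by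
  have hsub : ((List.range k).map (fun j : Nat => ((j : Int) + 1))) ⊆ xs := by
    intro x hx
    simp only [List.mem_map, List.mem_range] at hx
    obtain ⟨j, hj, rfl⟩ := hx
    exact pvPb_iff.mp h j hj
  have hnd : ((List.range k).map (fun j : Nat => ((j : Int) + 1))).Nodup := by
    refine List.Nodup.map ?_ List.nodup_range
    intro a b hab
    simpa using hab
  have := (hnd.subperm hsub).length_le
  simpa using this

theorem pvLe_chain_iff {xs : List Int} {k : Nat} :
    k ≤ pvChain xs ↔ pvPb xs k = true := by
  constructor
  · intro h
    rcases Nat.eq_zero_or_pos k with rfl | hk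
    · simp [pvPb]
    · have hc : 0 < pvChain xs := lt_of_lt_of_le hk h
      have hspec : pvPb xs (pvChain xs) = true := by
        unfold pvChain at *
        exact Nat.findGreatest_spec (P := fun k => pvPb xs k = true) (Nat.zero_le _) (by simp [pvPb])
      exact pvPb_down h hspec
  · intro h
    exact Nat.le_findGreatest (pvPb_le_length h) h

theorem pvChain_mem {xs : List Int} {j : Nat} (h1 : 1 ≤ j) (h2 : j ≤ pvChain xs) :
    ((j : Int)) ∈ xs := by
  have := pvPb_iff.mp (pvLe_chain_iff.mp h2) (j - 1) (by omega)
  have hj : ((j - 1 : Nat) : Int) + 1 = (j : Int) := by omega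
  rwa [hj] at this

theorem pvChain_mono {xs ys : List Int} (h : xs ⊆ ys) : pvChain xs ≤ pvChain ys := by
  apply pvLe_chain_iff.mpr
  rw [pvPb_iff]
  exact fun j hj => h (pvPb_iff.mp (pvLe_chain_iff.mp le_rfl) j hj)

theorem pvChain_succ_not_mem (xs : List Int) : ((pvChain xs : Int) + 1) ∉ xs := by
  intro hmem
  have hc : pvPb xs (pvChain xs) = true := pvLe_chain_iff.mp le_rfl
  have hsucc : pvPb xs (pvChain xs + 1) = true := by
    rw [pvPb_iff]
    intro j hj
    rcases Nat.lt_succ_iff_lt_or_eq.mp hj with h | rfl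
    · exact pvPb_iff.mp hc j h
    · exact hmem
  have := pvLe_chain_iff.mpr hsucc
  omega

theorem pvChain_nil : pvChain ([] : List Int) = 0 := rfl

-- the common functional specification: on day i the purchase is
-- (chain of take i, chain of take (i+1)] or [-1] if that interval is empty
def pvOut (vols : List Int) (i : Nat) : List Int :=
  let a := pvChain (vols.take i)
  let b := pvChain (vols.take (i + 1))
  if b = a then [-1] else PySem.List.pyRange ((a : Int) + 1) ((b : Int) + 1) 1

def pvSpec (vols : List Int) : List (List Int) :=
  (List.range vols.length).map (pvOut vols)

theorem pvOut_append {p : List Int} {v : Int} {i : Nat} (h : i < p.length) :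
    pvOut (p ++ [v]) i = pvOut p i := by
  unfold pvOut
  rw [List.take_append_of_le_length (by omega), List.take_append_of_le_length (by omega)]

theorem pvSpec_append (p : List Int) (v : Int) :
    pvSpec (p ++ [v]) = pvSpec p ++ [pvOut (p ++ [v]) p.length] := by
  unfold pvSpec
  rw [List.length_append, List.length_singleton, List.range_succ, List.map_append]
  congr 1
  apply List.map_congr_left
  intro i hi
  exact pvOut_append (List.mem_range.mp hi)

-- ---- A-side: the inner while loop buys exactly the integers in [next, M) ----

theorem pvInnerA_spec (M : Int) :
    ∀ (avail : PySem.Set Int) (next : Int) (today : List Int),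
      avail.Nodup → next ≤ M →
      (∀ j : Int, next ≤ j → j < M → j ∈ avail) → M ∉ avail →
      ∃ avail', buyInner avail next today =
          (today ++ PySem.List.pyRange next M 1, avail', M) ∧ avail'.Nodup ∧
          (∀ x : Int, x ∈ avail' ↔ x ∈ avail ∧ ¬(next ≤ x ∧ x < M)) := by
  intro avail next today
  induction hn : (M - next).toNat generalizing avail next today with
  | zero =>
    intro hnd hle hall hM
    have hEq : next = M := by omega
    subst hEq
    have hcon : PySem.Set.contains avail next = false := by
      rw [Bool.eq_false_iff]
      intro hc
      exact hM ((PySem.Set.contains_iff _ _).mp hc)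
    refine ⟨avail, ?_, hnd, ?_⟩
    · rw [buyInner]
      simp [hM, PySem.List.pyRange_one_eq_nil le_rfl]
    · intro x
      constructor
      · intro hx; exact ⟨hx, by omega⟩
      · rintro ⟨hx, _⟩; exact hx
  | succ n ih =>
    intro hnd hle hall hM
    have hlt : next < M := by omega
    have hmem : next ∈ avail := hall next le_rfl hlt
    have hcon : PySem.Set.contains avail next = true := (PySem.Set.contains_iff _ _).mpr hmem
    have hrm : PySem.Set.remove? avail next = some (PySem.Set.discard avail next) :=
      PySem.Set.remove?_of_mem hmem
    obtain ⟨avail', heq, hnd', hmem'⟩ :=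
      ih (PySem.Set.discard avail next) (next + 1) (today ++ [next])
        (by omega)
        (PySem.Set.nodup_discard _ _ hnd)
        (by omega)
        (fun j hj1 hj2 => (PySem.Set.mem_discard _ _ _).mpr ⟨hall j (by omega) hj2, by omega⟩)
        (fun h => hM ((PySem.Set.mem_discard _ _ _).mp h).1)
    refine ⟨avail', ?_, hnd', ?_⟩
    · rw [buyInner]
      simp only [hcon, dite_true]
      rw [hrm]
      change buyInner (avail.discard next) (next + 1) (today ++ [next]) = _
      rw [heq, PySem.List.pyRange_one_cons hlt]
      simp [List.append_assoc]
    · intro x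
      rw [hmem' x, PySem.Set.mem_discard _ _ _]
      constructor
      · rintro ⟨⟨hx, hne⟩, h2⟩
        exact ⟨hx, by omega⟩
      · rintro ⟨hx, h2⟩
        exact ⟨⟨hx, by omega⟩, by omega⟩

-- ---- A-side: the day-by-day invariant ----

def pvStepA (st : List (List Int) × PySem.Set Int × Int) (v : Int) :
    List (List Int) × PySem.Set Int × Int :=
  let available := PySem.Set.add st.2.1 v
  let r := buyInner available st.2.2 []
  if r.1.isEmpty then (st.1 ++ [[-1]], r.2.1, r.2.2)
  else (st.1 ++ [r.1], r.2.1, r.2.2)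

def pvInvA (p : List Int) (st : List (List Int) × PySem.Set Int × Int) : Prop :=
  st.1 = pvSpec p ∧ st.2.2 = (pvChain p : Int) + 1 ∧ st.2.1.Nodup ∧
    (∀ x : Int, (pvChain p : Int) < x → (x ∈ st.2.1 ↔ x ∈ p))

theorem pvStepA_spec {p : List Int} {st : List (List Int) × PySem.Set Int × Int} (v : Int)
    (h : pvInvA p st) : pvInvA (p ++ [v]) (pvStepA st v) := by
  obtain ⟨res, avail, next⟩ := st
  obtain ⟨hres, hnextEq, hnd, hinv⟩ := h
  simp only at hres hnextEq hnd hinv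
  subst hnextEq
  set c := pvChain p with hc
  set c' := pvChain (p ++ [v]) with hc'
  have hcc' : c ≤ c' := pvChain_mono (fun x hx => List.mem_append.mpr (Or.inl hx))
  have hAv : ∀ x : Int, (c : Int) < x → (x ∈ PySem.Set.add avail v ↔ x ∈ p ++ [v]) := by
    intro x hx
    rw [PySem.Set.mem_add, hinv x hx, List.mem_append, List.mem_singleton]
  obtain ⟨avail2, heq, hnd2, hmem2⟩ :=
    pvInnerA_spec ((c' : Int) + 1) (PySem.Set.add avail v) ((c : Int) + 1) []
      (PySem.Set.nodup_add _ _ hnd)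
      (by push_cast; omega)
      (by
        intro j h1 h2
        have hj : 1 ≤ j.toNat ∧ j.toNat ≤ c' ∧ (j.toNat : Int) = j := by omega
        have hm := pvChain_mem (xs := p ++ [v]) (j := j.toNat) (by omega) (by omega)
        rw [hj.2.2] at hm
        exact (hAv j (by omega)).mpr hm)
      (by
        intro hmem
        exact pvChain_succ_not_mem (p ++ [v]) ((hAv _ (by push_cast; omega)).mp hmem))
  have htake1 : (p ++ [v]).take p.length = p := by
    rw [List.take_append_of_le_length le_rfl, List.take_length]
  have htake2 : (p ++ [v]).take (p.length + 1) = p ++ [v] := by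
    apply List.take_of_length_le
    simp
  have hout : pvOut (p ++ [v]) p.length
      = if c' = c then [-1] else PySem.List.pyRange ((c : Int) + 1) ((c' : Int) + 1) 1 := by
    unfold pvOut
    rw [htake1, htake2]
  have hinv2 : ∀ x : Int, (c' : Int) < x → (x ∈ avail2 ↔ x ∈ p ++ [v]) := by
    intro x hx
    rw [hmem2 x]
    constructor
    · rintro ⟨hx1, _⟩
      exact (hAv x (by omega)).mp hx1
    · intro hx1
      exact ⟨(hAv x (by omega)).mpr hx1, by omega⟩
  simp only [pvStepA]
  rw [heq]
  simp only [List.nil_append]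
  by_cases hbc : c' = c
  · have hnil : PySem.List.pyRange ((c : Int) + 1) ((c' : Int) + 1) 1 = [] :=
      PySem.List.pyRange_one_eq_nil (by omega)
    rw [hnil]
    simp only [List.isEmpty_nil, if_true]
    refine ⟨?_, rfl, hnd2, hinv2⟩
    rw [pvSpec_append, hres, hout, if_pos hbc]
  · have hne : PySem.List.pyRange ((c : Int) + 1) ((c' : Int) + 1) 1 ≠ [] := by
      intro hh
      have := congrArg List.length hh
      rw [PySem.List.length_pyRange_one] at this
      simp at this
      omega
    rw [List.isEmpty_eq_false_iff.mpr hne]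
    simp only [Bool.false_eq_true, if_false]
    refine ⟨?_, rfl, hnd2, hinv2⟩
    rw [pvSpec_append, hres, hout, if_neg hbc]

theorem pvFoldA (q : List Int) :
    ∀ (p : List Int) (st : List (List Int) × PySem.Set Int × Int),
      pvInvA p st → pvInvA (p ++ q) (q.foldl pvStepA st) := by
  induction q with
  | nil => intro p st h; simpa using h
  | cons x q ih =>
    intro p st h
    have := ih (p ++ [x]) (pvStepA st x) (pvStepA_spec x h)
    simpa using this

theorem pvA_eq_spec (vols : List Int) : buyVolumes vols = pvSpec vols := by
  have h0 : pvInvA [] (([] : List (List Int)), PySem.Set.empty, (1 : Int)) := by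
    refine ⟨rfl, rfl, List.nodup_nil, ?_⟩
    intro x _
    simp [PySem.Set.empty]
  have h := pvFoldA vols [] _ h0
  simp only [List.nil_append] at h
  exact h.1

-- ---- B-side: the arrival dictionary is the first-occurrence index ----

def pvFIdx (vols : List Int) (v : Int) : Int := (List.idxOf v vols : Nat)

theorem pvBuildAux (xs : List Int) :
    ∀ (s : Int) (d : PySem.Dict Int Int) (v : Int),
      ((PySem.List.enumerate xs s).foldl
        (fun d iv => if d.contains iv.2 then d else d.insert iv.2 iv.1) d).get? v =
      if (d.get? v).isSome then d.get? v
      else if v ∈ xs then some (s + (List.idxOf v xs : Nat)) else none := by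
  induction xs with
  | nil =>
    intro s d v
    rw [PySem.List.enumerate_nil]
    cases hdv : d.get? v <;> simp [hdv]
  | cons x xs ih =>
    intro s d v
    rw [PySem.List.enumerate_cons, List.foldl_cons]
    have hTail : v ≠ x →
        (if v ∈ xs then some (s + 1 + (List.idxOf v xs : Nat)) else none)
          = if v ∈ x :: xs then some (s + (List.idxOf v (x :: xs) : Nat)) else none := by
      intro hvx
      have hidx : List.idxOf v (x :: xs) = List.idxOf v xs + 1 := by
        simp [Ne.symm hvx]
      simp only [List.mem_cons, hvx, false_or, hidx]
      by_cases hvxs : v ∈ xs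
      · simp only [hvxs, if_true]
        congr 1
        push_cast
        ring
      · simp [hvxs]
    by_cases hcx : d.contains x = true
    · rw [if_pos hcx, ih (s + 1) d v]
      by_cases hv : (d.get? v).isSome
      · simp [hv]
      · have hdn : d.get? v = none := Option.not_isSome_iff_eq_none.mp hv
        have hvx : v ≠ x := by
          rintro rfl
          rw [PySem.Dict.contains_eq_isSome_get?, hdn] at hcx
          simp at hcx
        simp only [hdn, Option.isSome_none, Bool.false_eq_true, if_false]
        exact hTail hvx
    · rw [if_neg hcx, ih (s + 1) (d.insert x s) v]
      by_cases hvx : v = x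
      · subst hvx
        rw [PySem.Dict.get?_insert_self]
        have hdn : d.get? v = none := by
          rw [← Option.not_isSome_iff_eq_none]
          intro hs
          rw [PySem.Dict.contains_eq_isSome_get?] at hcx
          exact hcx hs
        simp only [Option.isSome_some, if_true, hdn, Option.isSome_none, Bool.false_eq_true,
          if_false]
        rw [if_pos List.mem_cons_self]
        simp
      · rw [PySem.Dict.get?_insert_of_ne _ _ hvx]
        by_cases hv : (d.get? v).isSome
        · simp [hv]
        · have hdn : d.get? v = none := Option.not_isSome_iff_eq_none.mp hv
          simp only [hdn, Option.isSome_none, Bool.false_eq_true, if_false]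
          exact hTail hvx

theorem pvArrival_get? (vols : List Int) (v : Int) :
    (buildArrival vols).get? v = if v ∈ vols then some (pvFIdx vols v) else none := by
  have h := pvBuildAux vols 0 PySem.Dict.empty v
  unfold buildArrival
  rw [h]
  simp [pvFIdx, PySem.Dict.get?, PySem.Dict.empty]

theorem pvArrival_contains (vols : List Int) (k : Int) :
    (buildArrival vols).contains k = true ↔ k ∈ vols := by
  rw [PySem.Dict.contains_eq_isSome_get?, pvArrival_get?]
  by_cases h : k ∈ vols <;> simp [h]

theorem pvArrival_getD {vols : List Int} {k : Int} (h : k ∈ vols) :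
    (buildArrival vols).getD k 0 = pvFIdx vols k := by
  simp only [PySem.Dict.getD, pvArrival_get?, if_pos h, Option.getD_some]

theorem pvFIdx_lt {vols : List Int} {v : Int} (h : v ∈ vols) :
    pvFIdx vols v < (vols.length : Int) := by
  have := List.idxOf_lt_length_of_mem h
  simp only [pvFIdx]
  omega

theorem pvFIdx_le_iff {vols : List Int} {v : Int} (h : v ∈ vols) (i : Nat) :
    pvFIdx vols v ≤ (i : Int) ↔ v ∈ vols.take (i + 1) := by
  have key : ∀ (vols : List Int) (n : Nat), v ∈ vols.take n ↔ v ∈ vols ∧ List.idxOf v vols < n := by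
    intro vols
    induction vols with
    | nil => simp
    | cons x xs ih =>
      intro n
      cases n with
      | zero => simp
      | succ n =>
        by_cases hvx : v = x
        · subst hvx
          simp [List.take_succ_cons]
        · rw [List.take_succ_cons, List.mem_cons, List.mem_cons]
          have hidx : List.idxOf v (x :: xs) = List.idxOf v xs + 1 := by
            simp [Ne.symm hvx]
          rw [hidx, ih n]
          constructor
          · rintro (rfl | ⟨hv, hlt⟩)
            · exact absurd rfl hvx
            · exact ⟨Or.inr hv, by omega⟩
          · rintro ⟨hv, hlt⟩
            rcases hv with rfl | hv
            · exact absurd rfl hvx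
            · exact Or.inr ⟨hv, by omega⟩
  rw [key vols (i + 1)]
  unfold pvFIdx
  constructor
  · intro hle
    exact ⟨h, by omega⟩
  · rintro ⟨_, hlt⟩
    omega

-- running maximum of the first-occurrence days of 1..k
def pvDayOf (vols : List Int) : Nat → Int
  | 0 => 0
  | k + 1 => max (pvDayOf vols k) (pvFIdx vols ((k : Int) + 1))

theorem pvDayOf_nonneg (vols : List Int) (k : Nat) : 0 ≤ pvDayOf vols k := by
  induction k with
  | zero => simp [pvDayOf]
  | succ k ih => simp only [pvDayOf]; exact le_max_of_le_left ih

theorem pvDayOf_le_iff (vols : List Int) (k : Nat) (i : Int) (hi : 0 ≤ i) :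
    pvDayOf vols k ≤ i ↔ ∀ j : Nat, j < k → pvFIdx vols ((j : Int) + 1) ≤ i := by
  induction k with
  | zero => simp [pvDayOf, hi]
  | succ k ih =>
    simp only [pvDayOf, max_le_iff, ih]
    constructor
    · rintro ⟨h1, h2⟩ j hj
      rcases Nat.lt_succ_iff_lt_or_eq.mp hj with h | rfl
      · exact h1 j h
      · exact h2
    · intro h
      exact ⟨fun j hj => h j (by omega), h k (by omega)⟩

theorem pvDayOf_lt {vols : List Int} {k : Nat} (h1 : 1 ≤ k) (h2 : k ≤ pvChain vols) :
    pvDayOf vols k < (vols.length : Int) := by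
  induction k with
  | zero => omega
  | succ k ih =>
    simp only [pvDayOf, max_lt_iff]
    constructor
    · rcases Nat.eq_zero_or_pos k with rfl | hk
      · have hm : (1 : Int) ∈ vols := by
          have := pvChain_mem (xs := vols) (j := 1) le_rfl (by omega)
          simpa using this
        have hne : vols ≠ [] := by rintro rfl; simp at hm
        have hlen : 0 < vols.length := List.length_pos_iff.mpr hne
        simp only [pvDayOf]
        omega
      · exact ih hk (by omega)
    · have hm : ((k : Int) + 1) ∈ vols := by
        have := pvChain_mem (xs := vols) (j := k + 1) (by omega) h2
        push_cast at this
        exact this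
      exact pvFIdx_lt hm

-- key bridge: k is bucketed on day i iff chain(take i) < k ≤ chain(take (i+1))
theorem pvDayOf_le_iff_chain {vols : List Int} {k : Nat} (h1 : 1 ≤ k)
    (h2 : k ≤ pvChain vols) (i : Nat) :
    pvDayOf vols k ≤ (i : Int) ↔ k ≤ pvChain (vols.take (i + 1)) := by
  rw [pvDayOf_le_iff vols k i (Int.natCast_nonneg i), pvLe_chain_iff, pvPb_iff]
  refine ⟨fun H j hj => ?_, fun H j hj => ?_⟩
  · have hm : ((j : Int) + 1) ∈ vols := by
      have := pvChain_mem (xs := vols) (j := j + 1) (by omega) (by omega)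
      push_cast at this
      exact this
    exact (pvFIdx_le_iff hm i).mp (H j hj)
  · have hm : ((j : Int) + 1) ∈ vols := by
      have := pvChain_mem (xs := vols) (j := j + 1) (by omega) (by omega)
      push_cast at this
      exact this
    exact (pvFIdx_le_iff hm i).mpr (H j hj)

-- ---- B-side: the walk appends each k to bucket dayOf k ----

theorem pvWalkB_spec (vols : List Int) :
    ∀ (fuel k : Nat) (result : List (List Int)),
      result.length = vols.length → 1 ≤ k → k ≤ pvChain vols + 1 →
      pvChain vols + 1 ≤ k + fuel →
      ∀ i : Nat,
        (walkB (buildArrival vols) fuel (k : Int) (pvDayOf vols (k - 1)) result)[i]?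
          = result[i]?.map (fun lst => lst ++
              ((List.range' k (pvChain vols + 1 - k)).filter
                (fun t => pvDayOf vols t == (i : Int))).map (fun t : Nat => (t : Int))) := by
  intro fuel
  induction fuel with
  | zero =>
    intro k result hlen hk1 hk2 hfuel i
    have hk : k = pvChain vols + 1 := by omega
    subst hk
    simp [walkB]
  | succ fuel ih =>
    intro k result hlen hk1 hk2 hfuel i
    set K := pvChain vols with hK
    by_cases hk : k = K + 1
    · subst hk
      have hnm : ((K + 1 : Nat) : Int) ∉ vols := by
        push_cast
        exact pvChain_succ_not_mem vols
      have hcon : (buildArrival vols).contains ((K + 1 : Nat) : Int) = false := by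
        rw [Bool.eq_false_iff]
        intro hc
        exact hnm ((pvArrival_contains vols _).mp hc)
      simp only [walkB, hcon, Bool.false_eq_true, if_false]
      simp
    · have hkK : k ≤ K := by omega
      have hmem : ((k : Nat) : Int) ∈ vols := pvChain_mem hk1 hkK
      have hcon : (buildArrival vols).contains ((k : Nat) : Int) = true :=
        (pvArrival_contains vols _).mpr hmem
      have hgetD : (buildArrival vols).getD ((k : Nat) : Int) 0 = pvFIdx vols (k : Int) :=
        pvArrival_getD hmem
      have h0d : 0 ≤ pvDayOf vols k := pvDayOf_nonneg vols k
      have hdlt : pvDayOf vols k < (vols.length : Int) := pvDayOf_lt hk1 hkK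
      have hday :
          (if pvFIdx vols (k : Int) > pvDayOf vols (k - 1) then pvFIdx vols (k : Int)
            else pvDayOf vols (k - 1)) = pvDayOf vols k := by
        conv_rhs => rw [show k = (k - 1) + 1 by omega]
        have hcast : ((k - 1 : Nat) : Int) + 1 = (k : Int) := by omega
        simp only [pvDayOf, hcast]
        rcases lt_or_ge (pvDayOf vols (k - 1)) (pvFIdx vols (k : Int)) with h | h
        · rw [if_pos (by omega), max_eq_right (by omega)]
        · rw [if_neg (by omega), max_eq_left (by omega)]
      simp only [walkB, hcon, if_true]
      rw [hgetD, hday]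
      set dn := (pvDayOf vols k).toNat with hdn
      have hdnv : ((dn : Nat) : Int) = pvDayOf vols k := Int.toNat_of_nonneg h0d
      have hdnlt : dn < result.length := by omega
      have hset : PySem.List.pySetD result (pvDayOf vols k)
            (PySem.List.pyGetD result (pvDayOf vols k) [] ++ [((k : Nat) : Int)])
          = result.set dn (result[dn] ++ [((k : Nat) : Int)]) := by
        rw [PySem.List.pySetD_of_nonneg _ _ h0d, ← hdnv, PySem.List.pyGetD_natCast,
          List.getD_eq_getElem _ _ hdnlt]
        simp
      rw [hset]
      have hrec := ih (k + 1) (result.set dn (result[dn] ++ [((k : Nat) : Int)]))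
        (by simpa using hlen) (by omega) (by omega) (by omega) i
      have hcast2 : ((k + 1 : Nat) : Int) = ((k : Nat) : Int) + 1 := by push_cast; ring
      have hcast3 : pvDayOf vols ((k + 1) - 1) = pvDayOf vols k := by norm_num
      rw [hcast2, hcast3] at hrec
      rw [hrec]
      have hrange : List.range' k (K + 1 - k) = k :: List.range' (k + 1) (K - k) := by
        rw [show K + 1 - k = (K - k) + 1 by omega, List.range'_succ]
      rw [hrange, List.filter_cons]
      rw [List.getElem?_set]
      by_cases hieq : dn = i
      · subst hieq
        have hbeq : (pvDayOf vols k == ((dn : Nat) : Int)) = true := by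
          rw [beq_iff_eq, hdnv]
        rw [if_pos rfl, if_pos hdnlt, hbeq, List.getElem?_eq_getElem hdnlt]
        simp [List.append_assoc]
      · have hbeq : (pvDayOf vols k == ((i : Nat) : Int)) = false := by
          rw [beq_eq_false_iff_ne]
          intro hc
          apply hieq
          omega
        rw [if_neg hieq, hbeq]
        simp

-- the day-i bucket of the walk is exactly the interval (chain(take i), chain(take (i+1))]
theorem pvBucket (vols : List Int) (i : Nat) :
    ((List.range' 1 (pvChain vols)).filter
        (fun t => pvDayOf vols t == (i : Int))).map (fun t : Nat => (t : Int))
      = PySem.List.pyRange ((pvChain (vols.take i) : Int) + 1)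
          ((pvChain (vols.take (i + 1)) : Int) + 1) 1 := by
  set a := pvChain (vols.take i) with ha
  set b := pvChain (vols.take (i + 1)) with hb
  set K := pvChain vols with hKdef
  have hab : a ≤ b := by
    have hsub : vols.take i ⊆ vols.take (i + 1) := by
      intro x hx
      have : vols.take i = (vols.take (i + 1)).take i := by
        rw [List.take_take]
        congr 1
        omega
      rw [this] at hx
      exact List.take_subset _ _ hx
    exact pvChain_mono hsub
  have hbK : b ≤ K := pvChain_mono (List.take_subset _ _)
  have hchar : ∀ t : Nat, 1 ≤ t → t ≤ K → ((pvDayOf vols t = (i : Int)) ↔ (a < t ∧ t ≤ b)) := by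
    intro t h1 h2
    have hBiff : pvDayOf vols t ≤ (i : Int) ↔ t ≤ b := pvDayOf_le_iff_chain h1 h2 i
    have hAiff : pvDayOf vols t ≤ (i : Int) - 1 ↔ t ≤ a := by
      cases i with
      | zero =>
        have h0 := pvDayOf_nonneg vols t
        have ha0 : a = 0 := by rw [ha, List.take_zero, pvChain_nil]
        constructor
        · intro h
          exfalso
          omega
        · intro h
          exfalso
          omega
      | succ j =>
        have := pvDayOf_le_iff_chain h1 h2 j
        have hcast : ((Nat.succ j : Nat) : Int) - 1 = (j : Int) := by push_cast; ring
        rw [hcast]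
        exact this
    have h0 := pvDayOf_nonneg vols t
    constructor
    · intro he
      refine ⟨?_, hBiff.mp (by omega)⟩
      by_contra hc
      have := hAiff.mpr (by omega)
      omega
    · rintro ⟨h3, h4⟩
      have h5 := hBiff.mpr h4
      have h6 : ¬ pvDayOf vols t ≤ (i : Int) - 1 := fun hc => by
        have := hAiff.mp hc
        omega
      omega
  have hsplit : List.range' 1 K
      = (List.range' 1 a ++ List.range' (a + 1) (b - a)) ++ List.range' (b + 1) (K - b) := by
    have e1 : List.range' 1 a ++ List.range' (1 + 1 * a) (b - a) = List.range' 1 (a + (b - a)) :=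
      List.range'_append
    have e2 : List.range' 1 b ++ List.range' (1 + 1 * b) (K - b) = List.range' 1 (b + (K - b)) :=
      List.range'_append
    rw [show 1 + 1 * a = a + 1 by omega, show a + (b - a) = b by omega] at e1
    rw [show 1 + 1 * b = b + 1 by omega, show b + (K - b) = K by omega] at e2
    rw [e1, e2]
  rw [hsplit, List.filter_append, List.filter_append]
  have f1 : (List.range' 1 a).filter (fun t => pvDayOf vols t == (i : Int)) = [] := by
    rw [List.filter_eq_nil_iff]
    intro t ht
    rw [List.mem_range'_1] at ht
    rw [beq_iff_eq]
    intro hc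
    have := (hchar t (by omega) (by omega)).mp hc
    omega
  have f2 : (List.range' (a + 1) (b - a)).filter (fun t => pvDayOf vols t == (i : Int))
      = List.range' (a + 1) (b - a) := by
    rw [List.filter_eq_self]
    intro t ht
    rw [List.mem_range'_1] at ht
    rw [beq_iff_eq]
    exact (hchar t (by omega) (by omega)).mpr ⟨by omega, by omega⟩
  have f3 : (List.range' (b + 1) (K - b)).filter (fun t => pvDayOf vols t == (i : Int)) = [] := by
    rw [List.filter_eq_nil_iff]
    intro t ht
    rw [List.mem_range'_1] at ht
    rw [beq_iff_eq]
    intro hc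
    have := (hchar t (by omega) (by omega)).mp hc
    omega
  rw [f1, f2, f3, List.nil_append, List.append_nil]
  rw [PySem.List.pyRange_one, List.range'_eq_map_range, List.map_map]
  rw [show (((b : Int) + 1) - ((a : Int) + 1)).toNat = b - a by omega]
  apply List.map_congr_left
  intro x hx
  simp only [Function.comp_apply]
  push_cast
  ring

theorem pvB_eq_spec (vols : List Int) : buyVolumes_alt vols = pvSpec vols := by
  set K := pvChain vols with hKdef
  have hKn : K ≤ vols.length := Nat.findGreatest_le _
  have hwalk := pvWalkB_spec vols vols.length 1
    ((List.range vols.length).map (fun _ => ([] : List Int)))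
    (by simp) le_rfl (by omega) (by omega)
  simp only [Nat.cast_one, pvDayOf,
    Nat.add_sub_cancel] at hwalk
  simp only [buyVolumes_alt]
  apply List.ext_getElem?
  intro i
  rw [List.getElem?_map, hwalk i]
  by_cases hi : i < vols.length
  · have hres0 : ((List.range vols.length).map (fun _ => ([] : List Int)))[i]? = some [] := by
      simp [hi]
    have hspec : (pvSpec vols)[i]? = some (pvOut vols i) := by
      simp [pvSpec, hi]
    rw [hres0, hspec]
    simp only [Option.map_some, List.nil_append]
    congr 1
    rw [pvBucket vols i]
    unfold pvOut
    set a := pvChain (vols.take i) with ha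
    set b := pvChain (vols.take (i + 1)) with hb
    have hab : a ≤ b := by
      have hsub : vols.take i ⊆ vols.take (i + 1) := by
        intro x hx
        have : vols.take i = (vols.take (i + 1)).take i := by
          rw [List.take_take]
          congr 1
          omega
        rw [this] at hx
        exact List.take_subset _ _ hx
      exact pvChain_mono hsub
    by_cases hba : b = a
    · rw [if_pos hba]
      rw [PySem.List.pyRange_one_eq_nil (by omega)]
      simp
    · rw [if_neg hba]
      have hne : PySem.List.pyRange ((a : Int) + 1) ((b : Int) + 1) 1 ≠ [] := by
        intro hh
        have := congrArg List.length hh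
        rw [PySem.List.length_pyRange_one] at this
        simp at this
        omega
      rw [List.isEmpty_eq_false_iff.mpr hne]
      simp
  · have hres0 : ((List.range vols.length).map (fun _ => ([] : List Int)))[i]? = none := by
      simp [hi]
    have hspec : (pvSpec vols)[i]? = none := by
      simp [pvSpec, hi]
    rw [hres0, hspec]
    simp

-- ===== VERDICT (by name: the statement is the Claim_ definition above) =====
theorem buyVolumes_spec : Claim_equal_buyVolumes := by
  intro vols _
  unfold Spec_buyVolumes
  rw [pvA_eq_spec, pvB_eq_spec]
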